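-- pv_equiv track=rewrite | github.com/jacob-seiler/advent-of-code | 2023/q7/q7.py | calc_ranking
-- ===== SOURCE A (Python) =====
-- def calc_hand_type(hand, part2):
--     occurences = {card:hand.count(card) for card in hand}
--
--     if part2:
--         if len(occurences) > 1 and 'J' in occurences:
--             most_common_card = max([card for card in occurences if card != 'J'], key=occurences.get)
--             occurences[most_common_card] += occurences['J']
--             del occurences['J']
--
--     # 5 of a kind
--     if len(occurences) == 1:
--         return 'a'
--
--     if len(occurences) == 2:
--         # 4 of a kind
--         if 4 in occurences.values():
--             return 'b'
--
--         # Full house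
--         return 'c'
--
--     if len(occurences) == 3:
--         # 3 of a kind
--         if 3 in occurences.values():
--             return 'd'
--
--         # 2 pairs
--         return 'e'
--
--     if len(occurences) == 4:
--         # 1 pair
--         return 'f'
--
--     # High card
--     return 'g'
--
-- def calc_ranking(hand, part2):
--     value = [calc_hand_type(hand, part2)]
--
--     values = {
--         'A': 'a',
--         'K': 'b',
--         'Q': 'c',
--         'J': 'n' if part2 else 'd',
--         'T': 'e',
--         '9': 'f',
--         '8': 'g',
--         '7': 'h',
--         '6': 'i',
--         '5': 'j',
--         '4': 'k',
--         '3': 'l',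
--         '2': 'm'
--     }
--
--     for card in hand:
--         value.append(values[card])
--
--     return ''.join(value)
-- ===== SOURCE B (Python) =====
-- def calc_ranking(hand, part2):
--     # Sort the hand and scan runs of equal cards: sort-then-scan run lengths
--     # replace A's per-card hand.count rescans and dict of occurrences.
--     cards = sorted(hand)
--     sizes = []        # run length of each non-joker card, in ascending card order
--     joker_run = 0     # length of the run of 'J's, if present
--     i = 0
--     n = len(cards)
--     while i < n:
--         j = i + 1
--         while j < n and cards[j] == cards[i]:
--             j += 1
--         if cards[i] == 'J':
--             joker_run = j - i
--         else:
--             sizes.append(j - i)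
--         i = j
--
--     if part2 and joker_run and sizes:
--         # the jokers join one largest remaining group
--         m = sizes.index(max(sizes))
--         sizes[m] += joker_run
--     elif joker_run:
--         sizes.append(joker_run)
--
--     k = len(sizes)
--     if k == 2:
--         t = 'b' if 4 in sizes else 'c'
--     elif k == 3:
--         t = 'd' if 3 in sizes else 'e'
--     else:
--         t = {1: 'a', 4: 'f'}.get(k, 'g')
--
--     letters = dict(zip('AKQJT98765432', 'abcdefghijklm'))
--     if part2:
--         letters['J'] = 'n'
--     return t + ''.join(letters[c] for c in hand)
-- ===== Notes on version B (the rewrite author's own statement) =====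
-- stated objective: alternative
-- what changed: B sorts the hand and scans runs of equal adjacent cards (sort-then-scan, no dict of occurrences and no per-card hand.count rescans): the run-length list, with the joker run either merged into a largest group (part2) or appended, is classified directly by its length and one membership test, and card letters come from a zip-built translation table.
import Mathlib
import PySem

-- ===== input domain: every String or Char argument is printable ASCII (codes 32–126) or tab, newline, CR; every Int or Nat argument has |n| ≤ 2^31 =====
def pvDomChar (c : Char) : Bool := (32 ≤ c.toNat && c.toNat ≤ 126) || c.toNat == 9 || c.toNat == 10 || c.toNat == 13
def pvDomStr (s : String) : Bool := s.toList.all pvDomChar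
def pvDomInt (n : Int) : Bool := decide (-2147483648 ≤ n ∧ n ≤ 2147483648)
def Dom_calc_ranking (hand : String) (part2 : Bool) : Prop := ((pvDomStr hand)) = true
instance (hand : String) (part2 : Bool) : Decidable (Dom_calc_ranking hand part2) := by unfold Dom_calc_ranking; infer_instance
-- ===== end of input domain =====

-- B sorts the hand and classifies it from the run lengths of equal adjacent cards,
-- instead of A's dict of per-card hand.count rescans (objective: alternative).

-- ===== PORT A =====
-- occurences = {card: hand.count(card) for card in hand}, then the part2 joker merge.
def a_occurences (hand : String) (part2 : Bool) : PySem.Dict Char Int :=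
  let occ0 : PySem.Dict Char Int :=
    hand.toList.foldl
      (fun d card => d.insert card ((PySem.Str.count hand (String.ofList [card]) : Int)))
      PySem.Dict.empty
  if part2 then
    if 1 < occ0.size ∧ occ0.contains 'J' then
      -- max([card for card in occurences if card != 'J'], key=occurences.get);
      -- every listed key is present in occ0, so .get is occ0.getD · 0 here
      match PySem.List.max? (occ0.keys.filter (fun card => card ≠ 'J')) (fun c => occ0.getD c 0) with
      | some most_common_card =>
          (occ0.modify most_common_card 0 (· + occ0.getD 'J' 0)).erase 'J'
      | none => occ0   -- unreachable: size > 1 and 'J' present make the filtered list nonempty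
    else occ0
  else occ0

def calc_hand_type (hand : String) (part2 : Bool) : String :=
  let occurences := a_occurences hand part2
  if occurences.size = 1 then "a"
  else if occurences.size = 2 then
    (if (4 : Int) ∈ occurences.values then "b" else "c")
  else if occurences.size = 3 then
    (if (3 : Int) ∈ occurences.values then "d" else "e")
  else if occurences.size = 4 then "f"
  else "g"

def a_values (part2 : Bool) : PySem.Dict Char String :=
  PySem.Dict.ofList
    [('A', "a"), ('K', "b"), ('Q', "c"), ('J', if part2 then "n" else "d"), ('T', "e"),
     ('9', "f"), ('8', "g"), ('7', "h"), ('6', "i"), ('5', "j"), ('4', "k"), ('3', "l"), ('2', "m")]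

def calc_ranking (hand : String) (part2 : Bool) : String :=
  let value : List String := [calc_hand_type hand part2]
  let values := a_values part2
  -- values[card] is a KeyError outside the 13 card characters; those inputs are outside Pre_
  let value := value ++ hand.toList.map (fun card => (values.get? card).getD "")
  PySem.Str.join "" value

-- ===== PORT B =====
-- the outer while loop over the sorted hand: one (card, run length) pair per run of equal cards
def b_runs : List Char → List (Char × Int)
  | [] => []
  | c :: rest =>
      (c, ((rest.takeWhile (fun x => x = c)).length : Int) + 1) ::
        b_runs (rest.dropWhile (fun x => x = c))
  termination_by l => l.length
  decreasing_by simpa using Nat.lt_succ_of_le (List.length_dropWhile_le _ _)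

-- the loop body: a 'J' run is recorded in joker_run, any other run is appended to sizes
def b_split (runs : List (Char × Int)) : List Int × Int :=
  runs.foldl (fun acc r => if r.1 = 'J' then (acc.1, r.2) else (acc.1 ++ [r.2], acc.2)) ([], 0)

def b_sizes (hand : String) (part2 : Bool) : List Int :=
  let cards := PySem.List.sorted hand.toList (fun c => c) false
  let sj := b_split (b_runs cards)
  let sizes := sj.1
  let jr := sj.2
  if part2 ∧ jr ≠ 0 ∧ sizes ≠ [] then
    match PySem.List.max? sizes (fun x => x) with
    | some mx =>
      match PySem.List.index? sizes mx with
      | some m => sizes.set m (sizes.getD m 0 + jr)   -- sizes[m] += joker_run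
      | none => sizes      -- unreachable: max(sizes) ∈ sizes
    | none => sizes        -- unreachable: sizes ≠ []
  else if jr ≠ 0 then sizes ++ [jr]
  else sizes

def b_type (sizes : List Int) : String :=
  let k := sizes.length
  if k = 2 then (if (4 : Int) ∈ sizes then "b" else "c")
  else if k = 3 then (if (3 : Int) ∈ sizes then "d" else "e")
  else (PySem.Dict.ofList [((1 : Int), "a"), ((4 : Int), "f")]).getD (k : Int) "g"

def b_letters (part2 : Bool) : PySem.Dict Char Char :=
  let d := PySem.Dict.ofList (List.zip "AKQJT98765432".toList "abcdefghijklm".toList)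
  if part2 then d.insert 'J' 'n' else d

def calc_ranking_alt (hand : String) (part2 : Bool) : String :=
  -- letters[c] is a KeyError outside the 13 card characters; those inputs are outside Pre_
  b_type (b_sizes hand part2)
    ++ String.ofList (hand.toList.map (fun c => ((b_letters part2).get? c).getD ' '))

-- ===== PRECONDITION & SPEC =====
-- Pre_ excludes exactly the hands containing a character other than the 13 card
-- characters: on those A raises KeyError (and B raises KeyError too).
def cardChars : List Char := ['A','K','Q','J','T','9','8','7','6','5','4','3','2']
def Pre_calc_ranking (hand : String) (part2 : Bool) : Prop :=
  (hand.toList.all (fun c => c ∈ cardChars)) = true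
instance (hand : String) (part2 : Bool) : Decidable (Pre_calc_ranking hand part2) := by
  unfold Pre_calc_ranking; infer_instance
def pvWitness_calc_ranking : String × Bool := ("T55J5", true)

def Spec_calc_ranking (hand : String) (part2 : Bool) (out : String) : Prop := out = calc_ranking_alt hand part2
instance (hand : String) (part2 : Bool) (out : String) : Decidable (Spec_calc_ranking hand part2 out) := by unfold Spec_calc_ranking; infer_instance

-- ===== CLAIM (what is proved, stated in full; the proofs are below) =====
def Claim_equal_calc_ranking : Prop := ∀ (hand : String) (part2 : Bool), Dom_calc_ranking hand part2 → Pre_calc_ranking hand part2 → Spec_calc_ranking hand part2 (calc_ranking hand part2)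

-- ===== LEMMAS AND PROOFS =====

-- str.count with a single-character needle is List.count
lemma count_go_singleton (c : Char) : ∀ (fuel : ℕ) (l : List Char) (acc : ℕ),
    l.length ≤ fuel → PySem.Chars.count.go [c] fuel l acc = acc + l.count c := by
  intro fuel
  induction fuel with
  | zero =>
    intro l acc h
    have : l = [] := List.length_eq_zero_iff.mp (Nat.le_zero.mp h)
    subst this
    rw [PySem.Chars.count.go]; simp
  | succ n ih =>
    intro l acc h
    cases l with
    | nil =>
      rw [PySem.Chars.count.go]
      · simp
      · omega
    | cons a t =>
      rw [PySem.Chars.count.go]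
      simp only [List.isPrefixOf, Bool.and_true, List.length_cons] at *
      by_cases hc : c = a
      · subst hc
        simp only [beq_self_eq_true, if_pos, List.length_nil, Nat.zero_add, List.drop_succ_cons,
          List.drop_zero, List.count_cons_self]
        rw [ih t (acc + 1) (by omega)]
        omega
      · have hb : (c == a) = false := by simpa using hc
        simp only [hb, Bool.false_eq_true, reduceIte]
        rw [List.count_cons_of_ne (Ne.symm hc)]
        exact ih t acc (by omega)

lemma str_count_singleton (hand : String) (c : Char) :
    PySem.Str.count hand (String.ofList [c]) = hand.toList.count c := by
  rw [PySem.Str.count]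
  have h1 : (String.ofList [c]).toList = [c] := by simp
  rw [h1, PySem.Chars.count]
  simp only [List.isEmpty_cons, Bool.false_eq_true, reduceIte]
  rw [count_go_singleton c _ _ 0 le_rfl]
  omega

-- lookups in the dict built by the comprehension {c: v c for c in l}
lemma foldl_insert_apply_getD (v : Char → Int) (l : List Char) (d : PySem.Dict Char Int) (k : Char) :
    (l.foldl (fun d c => d.insert c (v c)) d).getD k 0 = if k ∈ l then v k else d.getD k 0 := by
  induction l generalizing d with
  | nil => simp
  | cons a t ih =>
    simp only [List.foldl_cons, ih, List.mem_cons]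
    rw [PySem.Dict.getD_insert]
    by_cases hk : k ∈ t
    · simp [hk]
    · by_cases ha : k = a <;> simp [hk, ha]

-- the dict comprehension {card: hand.count(card) for card in hand} is Counter(hand)
lemma a_occ0_eq_counter (hand : String) :
    hand.toList.foldl
      (fun d card => d.insert card ((PySem.Str.count hand (String.ofList [card]) : Int)))
      PySem.Dict.empty = PySem.Dict.counter hand.toList := by
  have hnd1 : (hand.toList.foldl
      (fun d card => d.insert card ((PySem.Str.count hand (String.ofList [card]) : Int)))
      PySem.Dict.empty).keys.Nodup :=
    PySem.Dict.nodup_keys_foldl_insert _ _ _ (by simp)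
  apply PySem.Dict.ext
  rw [PySem.Dict.items_eq_map_keys _ hnd1 0,
      PySem.Dict.items_eq_map_keys _ (PySem.Dict.nodup_keys_counter hand.toList) 0]
  have hkeys : (hand.toList.foldl
      (fun d card => d.insert card ((PySem.Str.count hand (String.ofList [card]) : Int)))
      PySem.Dict.empty).keys = (PySem.Dict.counter hand.toList).keys := by
    rw [PySem.Dict.keys_foldl_insert, PySem.Dict.keys_counter]
    simp [PySem.Set.update, PySem.Set.ofList]
  rw [hkeys]
  apply List.map_congr_left
  intro k hk
  have hkmem : k ∈ hand.toList := by
    rw [PySem.Dict.keys_counter] at hk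
    exact (PySem.Set.mem_ofList _ _).mp hk
  rw [foldl_insert_apply_getD, PySem.Dict.getD_counter, if_pos hkmem, str_count_singleton]

-- erase is invisible to lookups at other keys
lemma getD_erase_of_ne (d : PySem.Dict Char Int) (k k' : Char) (h : k' ≠ k) (d0 : Int) :
    (d.erase k).getD k' d0 = d.getD k' d0 := by
  rw [PySem.Dict.getD_eq_get?_getD, PySem.Dict.getD_eq_get?_getD]
  congr 1
  rw [PySem.Dict.get?, PySem.Dict.get?, PySem.Dict.erase]
  show (List.find? (fun p => p.1 == k') (List.filter (fun p => !p.1 == k) d.items)).map _ = _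
  rw [List.find?_filter]
  have hp : (fun a : Char × Int => decide ((!a.1 == k) = true ∧ (a.1 == k') = true))
      = fun p : Char × Int => p.1 == k' := by
    funext a
    by_cases ha : a.1 = k'
    · simp [ha, h]
    · simp [ha]
  rw [hp]

lemma keys_erase (d : PySem.Dict Char Int) (k : Char) :
    (d.erase k).keys = d.keys.filter (fun c => c ≠ k) := by
  rw [PySem.Dict.keys, PySem.Dict.keys, PySem.Dict.erase, List.filter_map]
  show List.map _ (List.filter _ d.items) = List.map _ (List.filter _ d.items)
  congr 1
  apply List.filter_congr
  intro p _
  simp only [Function.comp, ne_eq, decide_not]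
  rfl

-- insert at m ≠ 'J' commutes with erasing 'J'
lemma insert_erase_comm (C : PySem.Dict Char Int) (m : Char) (hm : C.contains m = true)
    (hmJ : m ≠ 'J') (val : Int) :
    (C.insert m val).erase 'J' = (C.erase 'J').insert m val := by
  have hm' : (C.erase 'J').contains m = true := by
    rw [PySem.Dict.contains] at hm ⊢
    rw [PySem.Dict.erase]
    simp only [List.any_eq_true, List.mem_filter] at hm ⊢
    obtain ⟨p, hp, hpm⟩ := hm
    have hpm' : p.1 = m := by simpa using hpm
    exact ⟨p, ⟨hp, by simp [hpm', hmJ]⟩, hpm⟩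
  rw [PySem.Dict.insert, PySem.Dict.insert, hm', hm]
  simp only [if_pos]
  apply PySem.Dict.ext
  show ((PySem.Dict.mk _).erase 'J').items = _
  rw [PySem.Dict.erase, PySem.Dict.erase]
  show List.filter _ (List.map _ C.items) = List.map _ (List.filter _ C.items)
  rw [List.filter_map]
  congr 1
  apply List.filter_congr
  intro p _
  simp only [Function.comp]
  by_cases hp : p.1 = m
  · simp [hp]
  · simp [hp]

-- run lengths of a sorted list are the multiplicities of its distinct elements
lemma runs_spec : ∀ (s : List Char), s.Pairwise (· ≤ ·) →
    ((b_runs s).map Prod.fst).Nodup ∧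
    (∀ x, x ∈ (b_runs s).map Prod.fst ↔ x ∈ s) ∧
    (∀ p ∈ b_runs s, p.2 = (s.count p.1 : Int)) := by
  intro s
  induction s using b_runs.induct with
  | case1 => simp [b_runs]
  | case2 c rest ih =>
    intro hs
    have hpc := List.pairwise_cons.mp hs
    have hrest_le : ∀ x ∈ rest, c ≤ x := hpc.1
    set tk := rest.takeWhile (fun x => decide (x = c)) with htk
    set dp := rest.dropWhile (fun x => decide (x = c)) with hdp
    have htd : tk ++ dp = rest := List.takeWhile_append_dropWhile
    have htake : ∀ x ∈ tk, x = c := by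
      intro x hx
      have := List.mem_takeWhile_imp hx
      simpa using this
    have hdrop_pairwise : dp.Pairwise (· ≤ ·) := hpc.2.sublist (List.dropWhile_sublist _)
    have hdrop_gt : ∀ x ∈ dp, c < x := by
      cases hd : dp with
      | nil => simp
      | cons h t =>
        have hd' : rest.dropWhile (fun x => decide (x = c)) = h :: t := by
          rw [← hdp]; exact hd
        have hh : ¬ (h = c) := by
          have hne : rest.dropWhile (fun x => decide (x = c)) ≠ [] := by rw [hd']; simp
          have h1 := List.head_dropWhile_not (fun x => decide (x = c)) hne
          have h2 : (rest.dropWhile (fun x => decide (x = c))).head hne = h := by simp [hd']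
          rw [h2] at h1
          simpa using h1
        have hmem_rest : ∀ x ∈ dp, x ∈ rest := fun x hx =>
          (List.dropWhile_sublist _).mem hx
        have hhdp : h ∈ dp := by rw [hd]; exact List.mem_cons_self
        have hch : c < h := lt_of_le_of_ne
          (hrest_le h (hmem_rest h hhdp)) (Ne.symm hh)
        intro x hx
        rcases List.mem_cons.mp hx with hxh | hxt
        · exact hxh ▸ hch
        · have hpw : (h :: t).Pairwise (· ≤ ·) := by rw [← hd]; exact hdrop_pairwise
          exact lt_of_lt_of_le hch ((List.pairwise_cons.mp hpw).1 x hxt)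
    have hcount_tk : tk.count c = tk.length :=
      List.count_eq_length.mpr (fun b hb => (htake b hb).symm)
    have hcnot_dp : c ∉ dp := fun hc => lt_irrefl c (hdrop_gt c hc)
    obtain ⟨ihnd, ihmem, ihcnt⟩ := ih hdrop_pairwise
    rw [b_runs]
    rw [← htk, ← hdp]
    refine ⟨?_, ?_, ?_⟩
    · simp only [List.map_cons]
      rw [List.nodup_cons]
      refine ⟨fun hc => ?_, ihnd⟩
      exact lt_irrefl c (hdrop_gt c ((ihmem c).mp hc))
    · intro x
      simp only [List.map_cons, List.mem_cons, ihmem]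
      constructor
      · rintro (rfl | hx)
        · exact Or.inl rfl
        · refine Or.inr ?_
          rw [← htd]
          exact List.mem_append_right tk hx
      · rintro (rfl | hx)
        · exact Or.inl rfl
        · rw [← htd] at hx
          rcases List.mem_append.mp hx with hx | hx
          · exact Or.inl (htake x hx)
          · exact Or.inr hx
    · intro p hp
      rcases List.mem_cons.mp hp with rfl | hp
      · simp only
        rw [← htd, List.count_cons_self, List.count_append, hcount_tk,
            List.count_eq_zero.mpr hcnot_dp]
        push_cast
        ring
      · have h2 := ihcnt p hp
        have hp1 : p.1 ∈ dp := (ihmem p.1).mp (List.mem_map_of_mem hp)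
        have hpc1 : c < p.1 := hdrop_gt _ hp1
        have hne : p.1 ≠ c := ne_of_gt hpc1
        have hnot_tk : p.1 ∉ tk := fun h => hne (htake _ h)
        rw [h2, ← htd, List.count_cons_of_ne (Ne.symm hne), List.count_append,
            List.count_eq_zero.mpr hnot_tk]
        norm_num

-- accumulator form of the sizes/joker_run loop
lemma b_split_foldl (l : List (Char × Int)) (acc : List Int × Int) :
    l.foldl (fun acc r => if r.1 = 'J' then (acc.1, r.2) else (acc.1 ++ [r.2], acc.2)) acc
    = (acc.1 ++ (l.filter (fun r => r.1 ≠ 'J')).map Prod.snd,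
       ((l.reverse.find? (fun r => r.1 = 'J')).map Prod.snd).getD acc.2) := by
  induction l generalizing acc with
  | nil => simp
  | cons r t ih =>
    simp only [List.foldl_cons]
    rw [ih]
    by_cases hr : r.1 = 'J'
    · simp only [hr, List.filter_cons, List.reverse_cons, List.find?_append]
      cases hf : t.reverse.find? (fun r => decide (r.1 = 'J')) with
      | none => simp [hr, List.find?, Option.or]
      | some q => simp [Option.or]
    · simp only [List.filter_cons, List.reverse_cons, List.find?_append]
      cases hf : t.reverse.find? (fun r => decide (r.1 = 'J')) with
      | none => simp [hr, List.find?, Option.or]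
      | some q => simp [hr, Option.or]

lemma b_split_fst (l : List (Char × Int)) :
    (b_split l).1 = (l.filter (fun r => r.1 ≠ 'J')).map Prod.snd := by
  rw [b_split, b_split_foldl]; simp

lemma b_split_snd (l : List (Char × Int)) :
    (b_split l).2 = ((l.reverse.find? (fun r => r.1 = 'J')).map Prod.snd).getD 0 := by
  rw [b_split, b_split_foldl]

-- pair lists whose second components are a function of the first
lemma filter_map_snd (f : Char → Int) : ∀ (l : List (Char × Int)), (∀ p ∈ l, p.2 = f p.1) →
    (l.filter (fun r => r.1 ≠ 'J')).map Prod.snd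
      = ((l.map Prod.fst).filter (fun c => c ≠ 'J')).map f := by
  intro l
  induction l with
  | nil => simp
  | cons r t ih =>
    intro h
    have hr := h r (List.mem_cons_self)
    have ht : ∀ p ∈ t, p.2 = f p.1 := fun p hp => h p (List.mem_cons_of_mem _ hp)
    have iht := ih ht
    simp only [ne_eq, decide_not] at iht ⊢
    by_cases hJ : r.1 = 'J'
    · simp [hJ, iht]
    · simp [hJ, iht, hr]

lemma filter_eq_singleton (l : List Char) (a : Char) (hnd : l.Nodup) (ha : a ∈ l) :
    l.filter (fun x => x = a) = [a] := by
  induction l with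
  | nil => simp at ha
  | cons b t ih =>
    rcases List.mem_cons.mp ha with rfl | ht
    · have h0 : t.filter (fun x => x = a) = [] := by
        rw [List.filter_eq_nil_iff]
        intro x hx
        have hxa : x ≠ a := by
          intro hxb; subst hxb; exact (List.nodup_cons.mp hnd).1 hx
        simpa using hxa
      simp [h0]
    · have hba : b ≠ a := by
        intro hba; subst hba; exact (List.nodup_cons.mp hnd).1 ht
      simp only [List.filter_cons]
      rw [if_neg (by simpa using hba)]
      exact ih (List.nodup_cons.mp hnd).2 ht

lemma values_insert_mem (D : PySem.Dict Char Int) (hnd : D.keys.Nodup) (mc : Char)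
    (hmc : mc ∈ D.keys) (v : Int) :
    ∃ l1 l2, D.values = l1 ++ D.getD mc 0 :: l2 ∧ (D.insert mc v).values = l1 ++ v :: l2 := by
  obtain ⟨q, hq, hq1⟩ : ∃ q ∈ D.items, q.1 = mc := by
    rw [PySem.Dict.keys] at hmc
    obtain ⟨q, hq, hq1⟩ := List.mem_map.mp hmc
    exact ⟨q, hq, hq1⟩
  obtain ⟨l1, l2, hitems⟩ := List.append_of_mem hq
  have hq' : (mc, q.2) ∈ D.items := by rw [← hq1]; simpa using hq
  have hget : D.get? mc = some q.2 := PySem.Dict.get?_of_mem_items D hq' hnd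
  have hgetD : D.getD mc 0 = q.2 := by rw [PySem.Dict.getD_eq_get?_getD, hget]; rfl
  have hkeys : D.keys = l1.map Prod.fst ++ mc :: l2.map Prod.fst := by
    rw [PySem.Dict.keys, hitems]; simp [hq1]
  have hnd' := hkeys ▸ hnd
  have hl1 : ∀ p ∈ l1, p.1 ≠ mc := by
    intro p hp hpm
    exact (List.nodup_append.mp hnd').2.2 p.1 (List.mem_map_of_mem hp) mc List.mem_cons_self hpm
  have hl2 : ∀ p ∈ l2, p.1 ≠ mc := by
    intro p hp hpm
    have := List.nodup_cons.mp (List.nodup_append.mp hnd').2.1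
    exact this.1 (hpm ▸ List.mem_map_of_mem hp)
  have hcont : D.contains mc = true := by
    rw [PySem.Dict.contains_eq_decide_mem_keys D]; simpa using hmc
  refine ⟨l1.map Prod.snd, l2.map Prod.snd, ?_, ?_⟩
  · rw [PySem.Dict.values, hitems, hgetD]
    simp
  · rw [PySem.Dict.insert, hcont]
    simp only [if_pos]
    show (D.items.map _).map _ = _
    rw [hitems]
    simp only [List.map_append, List.map_cons, List.map_map]
    congr 1
    · apply List.map_congr_left
      intro p hp
      simp [Function.comp, show (p.1 == mc) = false by simpa using hl1 p hp]
    · congr 1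
      · simp [hq1]
      · apply List.map_congr_left
        intro p hp
        simp [Function.comp, show (p.1 == mc) = false by simpa using hl2 p hp]


lemma one_lt_length_of_nodup (l : List Char) (a : Char) (hnd : l.Nodup) (ha : a ∈ l) :
    1 < l.length ↔ ∃ x ∈ l, x ≠ a := by
  constructor
  · intro hlen
    by_contra hno
    push Not at hno
    have hfa : l.filter (fun x => x = a) = l := List.filter_eq_self.mpr (by
      intro x hx; simpa using hno x hx)
    have h1 := filter_eq_singleton l a hnd ha
    rw [hfa] at h1
    rw [h1] at hlen
    simp at hlen
  · rintro ⟨x, hx, hxa⟩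
    rcases l with _ | ⟨y, t⟩
    · simp at ha
    · rcases t with _ | ⟨z, t'⟩
      · simp at ha hx
        exact absurd (hx.trans ha.symm) hxa
      · simp


-- the two-entry type table, as a conditional
lemma dictAF_getD (n : Int) : (PySem.Dict.ofList [((1:Int),"a"),((4:Int),"f")]).getD n "g"
    = if n = 1 then "a" else if n = 4 then "f" else "g" := by
  have he : PySem.Dict.ofList [((1:Int),"a"),((4:Int),"f")]
      = PySem.Dict.mk [((1:Int),"a"),((4:Int),"f")] := by decide
  rw [he, PySem.Dict.getD_eq_get?_getD, PySem.Dict.get?_mk_cons, PySem.Dict.get?_mk_cons]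
  by_cases h1 : n = 1
  · simp [h1]
  · by_cases h4 : n = 4
    · subst h4; simp [h1]
    · have b1 : ((1:Int) == n) = false := by simpa using fun h => h1 h.symm
      have b4 : ((4:Int) == n) = false := by simpa using fun h => h4 h.symm
      simp [b1, b4, PySem.Dict.get?, List.find?, h1, h4]
-- the multiset of occurrence counts is the multiset of run lengths (joker-merged alike)
lemma values_perm (hand : String) (part2 : Bool) :
    (a_occurences hand part2).values.Perm (b_sizes hand part2) := by
  have hA := a_occ0_eq_counter hand
  unfold a_occurences b_sizes
  simp only [hA]
  set h := hand.toList with hh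
  set C := PySem.Dict.counter h with hCdef
  set s := PySem.List.sorted h (fun c => c) false with hsdef
  have hsp : s.Perm h := PySem.List.sorted_perm h (fun c => c) false
  have hspw : s.Pairwise (· ≤ ·) := PySem.List.sorted_pairwise h (fun c => c)
  obtain ⟨hnodR, hmemR, hcntR⟩ := runs_spec s hspw
  set runs := b_runs s with hrunsdef
  set fstR := runs.map Prod.fst with hfstRdef
  have hcnt : ∀ p ∈ runs, p.2 = (h.count p.1 : Int) := fun p hp => by
    rw [hcntR p hp, hsp.count_eq]
  set S := (b_split runs).1 with hSdef
  set jr := (b_split runs).2 with hjrdef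
  have hsizes : S = (fstR.filter (fun c => c ≠ 'J')).map (fun c => (h.count c : Int)) := by
    rw [hSdef, b_split_fst]; exact filter_map_snd _ runs hcnt
  have hkeysC : C.keys = PySem.Set.ofList h := PySem.Dict.keys_counter h
  have hnodC : C.keys.Nodup := PySem.Dict.nodup_keys_counter h
  have hmemC : ∀ x, x ∈ C.keys ↔ x ∈ h := fun x => by
    rw [hkeysC]; exact PySem.Set.mem_ofList _ _
  have hkperm : C.keys.Perm fstR := by
    rw [List.perm_ext_iff_of_nodup hnodC hnodR]
    intro x
    rw [hmemC, hmemR, hsp.mem_iff]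
  have hvalC : C.values = C.keys.map (fun c => (h.count c : Int)) := by
    rw [PySem.Dict.values_eq_map_keys C hnodC 0]
    exact List.map_congr_left (fun k _ => PySem.Dict.getD_counter h k)
  have hcontJ : (C.contains 'J' = true) ↔ 'J' ∈ h := by
    rw [PySem.Dict.contains_counter]; simp
  have hjr_mem : 'J' ∈ h → jr = (h.count 'J' : Int) := by
    intro hJ
    rw [hjrdef, b_split_snd]
    have hJr : 'J' ∈ fstR := (hmemR 'J').mpr (hsp.mem_iff.mpr hJ)
    have hsome : (runs.reverse.find? (fun r => decide (r.1 = 'J'))).isSome = true := by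
      rw [List.find?_isSome]
      obtain ⟨p, hp, hp1⟩ := List.mem_map.mp hJr
      exact ⟨p, List.mem_reverse.mpr hp, by simp [hp1]⟩
    obtain ⟨q, hq⟩ := Option.isSome_iff_exists.mp hsome
    have hqJ : q.1 = 'J' := by simpa using List.find?_some hq
    have hqmem : q ∈ runs := List.mem_reverse.mp (List.mem_of_find?_eq_some hq)
    rw [hq]
    simp [hcnt q hqmem, hqJ]
  have hjr_not : 'J' ∉ h → jr = 0 := by
    intro hJ
    rw [hjrdef, b_split_snd]
    have hnone : runs.reverse.find? (fun r => decide (r.1 = 'J')) = none := by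
      rw [List.find?_eq_none]
      intro p hp
      have hp1 : p.1 ∈ fstR := List.mem_map_of_mem (List.mem_reverse.mp hp)
      have hph : p.1 ∈ h := hsp.mem_iff.mp ((hmemR p.1).mp hp1)
      simp only [decide_eq_true_eq]
      intro hJ'
      exact hJ (hJ' ▸ hph)
    rw [hnone]
    rfl
  have hjr_ne : (jr ≠ 0) ↔ 'J' ∈ h := by
    constructor
    · intro hne; by_contra hJ; exact hne (hjr_not hJ)
    · intro hJ h0
      rw [hjr_mem hJ] at h0
      have : 0 < h.count 'J' := List.count_pos_iff.mpr hJ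
      omega
  have hSne : (S ≠ []) ↔ ∃ x ∈ C.keys, x ≠ 'J' := by
    rw [hsizes]
    constructor
    · intro hne
      have hfne : fstR.filter (fun c => c ≠ 'J') ≠ [] := by
        intro h0; exact hne (by rw [h0]; rfl)
      obtain ⟨x, hx⟩ := List.exists_mem_of_ne_nil _ hfne
      have hx' := List.mem_filter.mp hx
      exact ⟨x, hkperm.mem_iff.mpr hx'.1, by simpa using hx'.2⟩
    · rintro ⟨x, hx, hxJ⟩ h0
      have hmap : fstR.filter (fun c => c ≠ 'J') = [] := List.map_eq_nil_iff.mp h0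
      have hxr : x ∈ fstR := hkperm.mem_iff.mp hx
      have hxm : x ∈ fstR.filter (fun c => c ≠ 'J') :=
        List.mem_filter.mpr ⟨hxr, by simpa using hxJ⟩
      rw [hmap] at hxm
      simp at hxm
  have hsize_len : C.size = C.keys.length := by simp [PySem.Dict.size, PySem.Dict.keys]
  have hnomerge : C.values.Perm (if jr ≠ 0 then S ++ [jr] else S) := by
    by_cases hJ : 'J' ∈ h
    · rw [if_pos (hjr_ne.mpr hJ), hjr_mem hJ]
      have hJk : 'J' ∈ C.keys := (hmemC 'J').mpr hJ
      have hfilt : C.keys.filter (fun c => c = 'J') = ['J'] :=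
        filter_eq_singleton _ _ hnodC hJk
      have hkp : C.keys.Perm (C.keys.filter (fun c => c ≠ 'J') ++ ['J']) := by
        have hp1 := List.filter_append_perm (fun c => decide (c = 'J')) C.keys
        have hco : (fun c : Char => !decide (c = 'J')) = (fun c : Char => decide (c ≠ 'J')) := by
          funext c; simp [ne_eq]
        rw [hco, hfilt] at hp1
        exact hp1.symm.trans List.perm_append_comm
      rw [hvalC, hsizes]
      have := hkp.map (fun c => (h.count c : Int))
      rw [List.map_append] at this
      refine this.trans ?_
      have hcJ : (['J'].map (fun c => (h.count c : Int))) = [(h.count 'J' : Int)] := rfl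
      rw [hcJ]
      exact List.Perm.append ((hkperm.filter _).map _) (List.Perm.refl _)
    · rw [if_neg (fun hne => hJ (hjr_ne.mp hne))]
      rw [hvalC, hsizes]
      have hnoJ : fstR.filter (fun c => c ≠ 'J') = fstR := by
        apply List.filter_eq_self.mpr
        intro x hx
        have : x ∈ h := hsp.mem_iff.mp ((hmemR x).mp hx)
        have : x ≠ 'J' := fun hxe => hJ (hxe ▸ this)
        simpa using this
      rw [hnoJ]
      exact hkperm.map _
  cases part2 with
  | false => simpa using hnomerge
  | true =>
    by_cases hgA : 1 < C.size ∧ C.contains 'J' = true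
    · have hJ : 'J' ∈ h := hcontJ.mp hgA.2
      have hSne' : S ≠ [] := hSne.mpr
        ((one_lt_length_of_nodup C.keys 'J' hnodC ((hmemC 'J').mpr hJ)).mp (hsize_len ▸ hgA.1))
      have hjr' : jr ≠ 0 := hjr_ne.mpr hJ
      rw [if_pos rfl, if_pos hgA, if_pos ⟨rfl, hjr', hSne'⟩]
      have hfperm : (C.keys.filter (fun c => c ≠ 'J')).Perm (fstR.filter (fun c => c ≠ 'J')) :=
        hkperm.filter _
      have hfne : C.keys.filter (fun c => c ≠ 'J') ≠ [] := by
        intro h0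
        have : fstR.filter (fun c => c ≠ 'J') = [] := by
          have := hfperm.length_eq
          rw [h0] at this
          exact List.length_eq_zero_iff.mp this.symm
        exact hSne' (by rw [hsizes, this]; rfl)
      obtain ⟨mc, hmc⟩ : ∃ mc, PySem.List.max? (C.keys.filter (fun c => c ≠ 'J'))
          (fun c => C.getD c 0) = some mc := by
        cases hq : PySem.List.max? (C.keys.filter (fun c => c ≠ 'J')) (fun c => C.getD c 0) with
        | none => exact absurd ((PySem.List.max?_eq_none_iff _ _).mp hq) hfne
        | some m => exact ⟨m, rfl⟩
      rw [hmc]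
      dsimp only
      obtain ⟨mx, hmx⟩ : ∃ mx, PySem.List.max? S (fun x => x) = some mx := by
        cases hq : PySem.List.max? S (fun x => x) with
        | none => exact absurd ((PySem.List.max?_eq_none_iff _ _).mp hq) hSne'
        | some m => exact ⟨m, rfl⟩
      rw [hmx]
      dsimp only
      have hmxS : mx ∈ S := PySem.List.max?_mem hmx
      obtain ⟨m, hm⟩ : ∃ m, PySem.List.index? S mx = some m := by
        have := (PySem.List.index?_isSome_iff S mx).mpr hmxS
        exact Option.isSome_iff_exists.mp this
      rw [hm]
      dsimp only
      obtain ⟨hmlt, hSm, _⟩ := PySem.List.getElem_of_index?_eq_some hm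
      have hmcf : mc ∈ C.keys.filter (fun c => c ≠ 'J') := PySem.List.max?_mem hmc
      have hmck : mc ∈ C.keys := (List.mem_filter.mp hmcf).1
      have hmcJ : mc ≠ 'J' := by simpa using (List.mem_filter.mp hmcf).2
      have hmodins : C.modify mc 0 (· + C.getD 'J' 0)
          = C.insert mc (C.getD mc 0 + C.getD 'J' 0) := rfl
      rw [hmodins, insert_erase_comm C mc ((PySem.Dict.contains_iff_mem_keys C mc).mpr hmck) hmcJ]
      set D := C.erase 'J' with hDdef
      have hDkeys : D.keys = C.keys.filter (fun c => c ≠ 'J') := keys_erase C 'J'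
      have hDnod : D.keys.Nodup := by rw [hDkeys]; exact hnodC.filter _
      have hmcD : mc ∈ D.keys := by rw [hDkeys]; exact hmcf
      have hDgetD : ∀ c ∈ D.keys, D.getD c 0 = (h.count c : Int) := by
        intro c hc
        have hcJ : c ≠ 'J' := by rw [hDkeys] at hc; simpa using (List.mem_filter.mp hc).2
        rw [hDdef, getD_erase_of_ne C 'J' c hcJ, PySem.Dict.getD_counter]
      have hvalD : D.values = D.keys.map (fun c => (h.count c : Int)) := by
        rw [PySem.Dict.values_eq_map_keys D hDnod 0]
        exact List.map_congr_left hDgetD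
      have hDSperm : D.values.Perm S := by
        rw [hvalD, hsizes, hDkeys]
        exact hfperm.map _
      have hold : D.getD mc 0 = mx := by
        have h1 : D.getD mc 0 ∈ D.values := by
          rw [PySem.Dict.values_eq_map_keys D hDnod 0]
          exact List.mem_map_of_mem hmcD
        have h2 : D.getD mc 0 ∈ S := hDSperm.mem_iff.mp h1
        have h3 : mx ∈ D.values := hDSperm.mem_iff.mpr hmxS
        have hub1 : ∀ y ∈ S, y ≤ mx := fun y hy => PySem.List.max?_isMax hmx y hy
        have hub2 : ∀ y ∈ D.values, y ≤ D.getD mc 0 := by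
          intro y hy
          rw [hvalD] at hy
          obtain ⟨c, hc, rfl⟩ := List.mem_map.mp hy
          have hcf : c ∈ C.keys.filter (fun c => c ≠ 'J') := by rw [← hDkeys]; exact hc
          have hle := PySem.List.max?_isMax hmc c hcf
          rw [PySem.Dict.getD_counter, PySem.Dict.getD_counter] at hle
          rw [hDgetD mc hmcD]
          exact hle
        exact le_antisymm (hub1 _ h2) (hub2 mx h3)
      obtain ⟨L1, L2, hDval, hInsval⟩ :=
        values_insert_mem D hDnod mc hmcD (C.getD mc 0 + C.getD 'J' 0)
      have hCmc : C.getD mc 0 = D.getD mc 0 := (getD_erase_of_ne C 'J' mc hmcJ 0).symm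
      have hCJ : C.getD 'J' 0 = jr := by
        rw [PySem.Dict.getD_counter, hjr_mem hJ]
      have hSgetD : S.getD m 0 = mx := by
        rw [List.getD_eq_getElem?_getD, List.getElem?_eq_getElem hmlt, hSm]
        rfl
      have hv : C.getD mc 0 + C.getD 'J' 0 = mx + jr := by rw [hCmc, hold, hCJ]
      rw [hInsval, hv, hSgetD]
      have hset : S.set m (mx + jr) = S.take m ++ (mx + jr) :: S.drop (m+1) :=
        List.set_eq_take_cons_drop _ hmlt
      have hS_decomp : S.take m ++ mx :: S.drop (m+1) = S := by
        have := List.set_eq_take_cons_drop (l := S) S[m] hmlt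
        rw [List.set_getElem_self] at this
        rw [← hSm]
        exact this.symm
      have h5 : (L1 ++ L2).Perm (S.take m ++ S.drop (m+1)) := by
        have p1 : D.values.Perm (mx :: (L1 ++ L2)) := by
          rw [hDval, hold]
          exact List.perm_middle
        have p2 : S.Perm (mx :: (S.take m ++ S.drop (m+1))) := by
          conv_lhs => rw [← hS_decomp]
          exact List.perm_middle
        exact ((p1.symm.trans hDSperm).trans p2).cons_inv
      rw [hset]
      exact (List.perm_middle.trans (h5.cons _)).trans List.perm_middle.symm
    · have hngB : ¬((true = true) ∧ jr ≠ 0 ∧ S ≠ []) := by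
        rintro ⟨-, hjr', hSne'⟩
        have hJ : 'J' ∈ h := hjr_ne.mp hjr'
        refine hgA ⟨?_, hcontJ.mpr hJ⟩
        rw [hsize_len]
        exact (one_lt_length_of_nodup C.keys 'J' hnodC ((hmemC 'J').mpr hJ)).mpr (hSne.mp hSne')
      rw [if_pos rfl, if_neg hgA, if_neg hngB]
      exact hnomerge

-- both hand-type computations depend only on the multiset of counts, and agree
lemma type_eq_of_perm (hand : String) (part2 : Bool)
    (hp : (a_occurences hand part2).values.Perm (b_sizes hand part2)) :
    calc_hand_type hand part2 = b_type (b_sizes hand part2) := by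
  rw [calc_hand_type, b_type]
  have hsize : (a_occurences hand part2).size = (a_occurences hand part2).values.length := by
    simp [PySem.Dict.values, PySem.Dict.size]
  have hlen := hp.length_eq
  have hmem4 : ((4:Int) ∈ (a_occurences hand part2).values) ↔ (4:Int) ∈ b_sizes hand part2 :=
    hp.mem_iff
  have hmem3 : ((3:Int) ∈ (a_occurences hand part2).values) ↔ (3:Int) ∈ b_sizes hand part2 :=
    hp.mem_iff
  rw [hsize, hlen]
  set n := (b_sizes hand part2).length with hn
  by_cases h1 : n = 1
  · rw [if_pos h1, if_neg (by omega), if_neg (by omega), dictAF_getD]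
    rw [if_pos (by exact_mod_cast congrArg (Nat.cast : Nat → Int) h1)]
  · by_cases h2 : n = 2
    · rw [if_neg h1, if_pos h2, if_pos h2]
      by_cases hm : (4:Int) ∈ (a_occurences hand part2).values
      · rw [if_pos hm, if_pos (hmem4.mp hm)]
      · rw [if_neg hm, if_neg (fun h => hm (hmem4.mpr h))]
    · by_cases h3 : n = 3
      · rw [if_neg h1, if_neg h2, if_pos h3, if_neg h2, if_pos h3]
        by_cases hm : (3:Int) ∈ (a_occurences hand part2).values
        · rw [if_pos hm, if_pos (hmem3.mp hm)]
        · rw [if_neg hm, if_neg (fun h => hm (hmem3.mpr h))]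
      · by_cases h4 : n = 4
        · rw [if_neg h1, if_neg h2, if_neg h3, if_pos h4, if_neg h2, if_neg h3, dictAF_getD]
          rw [if_neg (by omega), if_pos (by exact_mod_cast congrArg (Nat.cast : Nat → Int) h4)]
        · rw [if_neg h1, if_neg h2, if_neg h3, if_neg h4, if_neg h2, if_neg h3, dictAF_getD]
          rw [if_neg (by omega), if_neg (by omega)]

lemma b_type_singleton (W : List Int) : ∃ c, (b_type W).toList = [c] := by
  rw [b_type]
  split_ifs
  · exact ⟨'b', by decide⟩
  · exact ⟨'c', by decide⟩
  · exact ⟨'d', by decide⟩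
  · exact ⟨'e', by decide⟩
  · rw [dictAF_getD]
    split_ifs
    · exact ⟨'a', by decide⟩
    · exact ⟨'f', by decide⟩
    · exact ⟨'g', by decide⟩

-- per-card letter: the two translation tables agree on the 13 card characters
lemma letter_eq (part2 : Bool) (c : Char) (hc : c ∈ cardChars) :
    ((a_values part2).get? c).getD "" = String.ofList [((b_letters part2).get? c).getD ' '] := by
  have hc' : c ∈ ['A','K','Q','J','T','9','8','7','6','5','4','3','2'] := by
    simpa [cardChars] using hc
  cases part2 <;> fin_cases hc' <;> decide

theorem calc_ranking_spec : Claim_equal_calc_ranking := by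
  intro hand part2 _ hpre
  rw [Pre_calc_ranking, List.all_eq_true] at hpre
  have hpre' : ∀ c ∈ hand.toList, c ∈ cardChars := fun c hc => by simpa using hpre c hc
  unfold Spec_calc_ranking
  apply String.toList_inj.mp
  show (PySem.Str.join "" ([calc_hand_type hand part2]
          ++ hand.toList.map (fun card => ((a_values part2).get? card).getD ""))).toList
      = (b_type (b_sizes hand part2)
          ++ String.ofList (hand.toList.map (fun c => ((b_letters part2).get? c).getD ' '))).toList
  obtain ⟨tc, htc⟩ := b_type_singleton (b_sizes hand part2)
  have h1 : calc_hand_type hand part2 = b_type (b_sizes hand part2) :=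
    type_eq_of_perm hand part2 (values_perm hand part2)
  have htype : (calc_hand_type hand part2).toList = [tc] := by rw [h1, htc]
  rw [PySem.Str.toList_join]
  have hsep : ("" : String).toList = [] := rfl
  rw [hsep]
  have hmap : ([calc_hand_type hand part2]
        ++ hand.toList.map (fun card => ((a_values part2).get? card).getD "")).map String.toList
      = (tc :: hand.toList.map (fun c => ((b_letters part2).get? c).getD ' ')).map (fun c => [c]) := by
    simp only [List.singleton_append, List.map_cons, List.map_map, htype]
    refine congrArg (List.cons [tc]) ?_
    apply List.map_congr_left
    intro c hcmem
    have hl := letter_eq part2 c (hpre' c hcmem)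
    simp only [Function.comp]
    rw [hl, String.toList_ofList]
  rw [hmap, PySem.Chars.join_nil_singletons]
  rw [String.toList_append, htc, String.toList_ofList]
  rfl
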